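-- pv_equiv track=rewrite | github.com/lannyf/Mushroom-identification-application | models/trait_database_comparator.py | _shapes_match
-- ===== SOURCE A (Python) =====
-- from typing import Any, Dict, List, Optional, Tuple
--
-- _SHAPE_SYNONYMS: Dict[str, List[str]] = {
--     "funnel-shaped":  ["funnel", "funnel-shaped", "vase", "trumpet", "infundibuliform"],
--     "convex":         ["convex", "rounded", "dome", "hemispherical"],
--     "flat":           ["flat", "plane", "depressed", "flattened"],
--     "bell-shaped":    ["bell", "campanulate", "conical", "umbonate"],
--     "wavy":           ["wavy", "irregular", "undulate", "lobed", "wavy-edged"],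
--     "convex|flat":    ["convex", "flat", "convex|flat"],
--     "smooth":         ["smooth"],
-- }
--
-- def _shapes_match(visible: str, db_value: str) -> str:
--     v = visible.lower().strip()
--     db = db_value.lower()
--     if v in db or db in v:
--         return "exact"
--     synonyms = _SHAPE_SYNONYMS.get(v, [v])
--     for syn in synonyms:
--         if syn in db:
--             return "partial"
--     # check reverse
--     for k, syns in _SHAPE_SYNONYMS.items():
--         if v in syns:
--             for syn in syns:
--                 if syn in db:
--                     return "partial"
--     return "conflict"
-- ===== SOURCE B (Python) =====
-- from typing import Dict, List
--
-- _SHAPE_SYNONYMS: Dict[str, List[str]] = {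
--     "funnel-shaped":  ["funnel", "funnel-shaped", "vase", "trumpet", "infundibuliform"],
--     "convex":         ["convex", "rounded", "dome", "hemispherical"],
--     "flat":           ["flat", "plane", "depressed", "flattened"],
--     "bell-shaped":    ["bell", "campanulate", "conical", "umbonate"],
--     "wavy":           ["wavy", "irregular", "undulate", "lobed", "wavy-edged"],
--     "convex|flat":    ["convex", "flat", "convex|flat"],
--     "smooth":         ["smooth"],
-- }
--
-- # whole vocabulary of synonym tokens, precomputed once
-- _ALL_TOKENS: List[str] = sorted({t for syns in _SHAPE_SYNONYMS.values() for t in syns})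
--
-- def _related(v: str, t: str) -> bool:
--     # t is related to v iff some table row lists t and is v's own row or lists v
--     for k, syns in _SHAPE_SYNONYMS.items():
--         if t in syns and (k == v or v in syns):
--             return True
--     return False
--
-- def _shapes_match(visible: str, db_value: str) -> str:
--     v = visible.lower().strip()
--     db = db_value.lower()
--     if v in db or db in v:
--         return "exact"
--     # scan the vocabulary: which known tokens occur in db, and is any related to v?
--     for t in _ALL_TOKENS:
--         if t in db and _related(v, t):
--             return "partial"
--     return "conflict"
-- ===== Notes on version B (the rewrite author's own statement) =====
-- stated objective: alternative
-- what changed: Instead of scanning v's own synonym list and then re-scanning the dict for groups containing v, B precomputes the global token vocabulary and scans it once, returning 'partial' on the first token that occurs in db and is table-related to v; the loop runs over the vocabulary, not over v's candidates, and no candidate list is built.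
import Mathlib
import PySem

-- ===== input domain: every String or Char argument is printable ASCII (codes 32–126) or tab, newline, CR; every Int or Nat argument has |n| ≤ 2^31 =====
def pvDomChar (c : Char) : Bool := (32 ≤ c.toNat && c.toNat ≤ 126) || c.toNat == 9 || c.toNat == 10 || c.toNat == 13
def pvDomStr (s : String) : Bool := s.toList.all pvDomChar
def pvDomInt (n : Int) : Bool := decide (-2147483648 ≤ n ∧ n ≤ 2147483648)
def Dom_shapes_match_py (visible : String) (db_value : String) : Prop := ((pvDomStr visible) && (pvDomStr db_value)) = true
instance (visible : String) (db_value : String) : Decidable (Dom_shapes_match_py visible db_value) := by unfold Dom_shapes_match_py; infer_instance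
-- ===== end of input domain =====

-- B replaces A's forward synonym loop plus reverse dict re-scan by one pass over the
-- precomputed global token vocabulary, testing each vocabulary token for presence in db
-- and table-relatedness to v (objective: alternative decomposition; same cost).

-- ===== PORT A =====
def shapeSynonyms : PySem.Dict String (List String) := PySem.Dict.ofList [
  ("funnel-shaped", ["funnel", "funnel-shaped", "vase", "trumpet", "infundibuliform"]),
  ("convex",        ["convex", "rounded", "dome", "hemispherical"]),
  ("flat",          ["flat", "plane", "depressed", "flattened"]),
  ("bell-shaped",   ["bell", "campanulate", "conical", "umbonate"]),
  ("wavy",          ["wavy", "irregular", "undulate", "lobed", "wavy-edged"]),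
  ("convex|flat",   ["convex", "flat", "convex|flat"]),
  ("smooth",        ["smooth"])]

-- the 'for syn in …: if syn in db: return "partial"' loop (both the forward loop and the inner reverse loop)
def synLoop (db : String) : List String → Option String
  | [] => none
  | syn :: rest => if PySem.Str.isIn syn db then some "partial" else synLoop db rest

-- the 'for k, syns in _SHAPE_SYNONYMS.items(): if v in syns: …' loop
def revLoop (v db : String) : List (String × List String) → Option String
  | [] => none
  | (_, syns) :: rest =>
    if syns.contains v then
      match synLoop db syns with
      | some r => some r
      | none => revLoop v db rest
    else revLoop v db rest

def shapes_match_py (visible : String) (db_value : String) : String :=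
  let v := PySem.Str.strip (PySem.Str.lower visible)
  let db := PySem.Str.lower db_value
  if PySem.Str.isIn v db || PySem.Str.isIn db v then "exact"
  else
    let synonyms := (shapeSynonyms.get? v).getD [v]
    match synLoop db synonyms with
    | some r => r
    | none =>
      match revLoop v db shapeSynonyms.items with
      | some r => r
      | none => "conflict"

-- ===== PORT B =====
-- _ALL_TOKENS = sorted({t for syns in _SHAPE_SYNONYMS.values() for t in syns})
def allTokens : List String :=
  PySem.List.sorted (PySem.Set.ofList (shapeSynonyms.values.flatMap (fun syns => syns))) (fun x => x) false

-- def _related(v, t): for k, syns in _SHAPE_SYNONYMS.items(): if t in syns and (k == v or v in syns): return True; return False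
def relatedLoop (v t : String) : List (String × List String) → Bool
  | [] => false
  | (k, syns) :: rest =>
    if syns.contains t && (k == v || syns.contains v) then true else relatedLoop v t rest

-- the 'for t in _ALL_TOKENS: if t in db and _related(v, t): return "partial"' loop
def tokLoop (v db : String) : List String → String
  | [] => "conflict"
  | t :: rest =>
    if PySem.Str.isIn t db && relatedLoop v t shapeSynonyms.items then "partial"
    else tokLoop v db rest

def shapes_match_py_alt (visible : String) (db_value : String) : String :=
  let v := PySem.Str.strip (PySem.Str.lower visible)
  let db := PySem.Str.lower db_value
  if PySem.Str.isIn v db || PySem.Str.isIn db v then "exact"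
  else tokLoop v db allTokens

-- ===== PRECONDITION & SPEC =====
def Spec_shapes_match_py (visible : String) (db_value : String) (out : String) : Prop := out = shapes_match_py_alt visible db_value
instance (visible : String) (db_value : String) (out : String) : Decidable (Spec_shapes_match_py visible db_value out) := by unfold Spec_shapes_match_py; infer_instance

-- ===== CLAIM (what is proved, stated in full; the proofs are below) =====
def Claim_equal_shapes_match_py : Prop := ∀ (visible : String) (db_value : String), Dom_shapes_match_py visible db_value → Spec_shapes_match_py visible db_value (shapes_match_py visible db_value)

-- ===== LEMMAS AND PROOFS =====

theorem synLoop_eq_any (db : String) (l : List String) :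
    synLoop db l = if l.any (fun syn => PySem.Str.isIn syn db) then some "partial" else none := by
  induction l with
  | nil => rfl
  | cons syn rest ih =>
    simp only [synLoop, List.any_cons, ih]
    by_cases h : PySem.Str.isIn syn db = true
    · simp only [h]; rfl
    · rw [Bool.not_eq_true] at h
      simp only [h]; rfl

theorem revLoop_eq_any (v db : String) (items : List (String × List String)) :
    revLoop v db items =
      if items.any (fun kv => kv.2.contains v && kv.2.any (fun syn => PySem.Str.isIn syn db))
      then some "partial" else none := by
  induction items with
  | nil => rfl
  | cons kv rest ih =>
    obtain ⟨k, syns⟩ := kv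
    simp only [revLoop, synLoop_eq_any, List.any_cons, ih]
    by_cases h : syns.contains v = true
    · by_cases h2 : syns.any (fun syn => PySem.Str.isIn syn db) = true
      · simp only [h, h2]; rfl
      · rw [Bool.not_eq_true] at h2
        simp only [h, h2]; rfl
    · rw [Bool.not_eq_true] at h
      simp only [h]; rfl

theorem relatedLoop_eq_any (v t : String) (items : List (String × List String)) :
    relatedLoop v t items =
      items.any (fun kv => kv.2.contains t && (kv.1 == v || kv.2.contains v)) := by
  induction items with
  | nil => rfl
  | cons kv rest ih =>
    obtain ⟨k, syns⟩ := kv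
    simp only [relatedLoop, List.any_cons, ih]
    by_cases h : (syns.contains t && (k == v || syns.contains v)) = true
    · simp only [h, Bool.true_or]; rfl
    · rw [Bool.not_eq_true] at h
      simp only [h, Bool.false_or]; rfl

theorem tokLoop_eq_ite (v db : String) (toks : List String) :
    tokLoop v db toks =
      if toks.any (fun t => PySem.Str.isIn t db && relatedLoop v t shapeSynonyms.items)
      then "partial" else "conflict" := by
  induction toks with
  | nil => rfl
  | cons t rest ih =>
    simp only [tokLoop, List.any_cons, ih]
    by_cases h : (PySem.Str.isIn t db && relatedLoop v t shapeSynonyms.items) = true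
    · simp only [h, Bool.true_or]; rfl
    · rw [Bool.not_eq_true] at h
      simp only [h, Bool.false_or]; rfl

theorem shapeSynonyms_keys_nodup : shapeSynonyms.keys.Nodup := by decide

-- vocabulary membership is membership in the flattened table values
theorem mem_allTokens (t : String) :
    t ∈ allTokens ↔ t ∈ shapeSynonyms.values.flatMap (fun syns => syns) := by
  simp [allTokens, PySem.List.mem_sorted, PySem.Set.mem_ofList]

-- every token of every table row is in the precomputed vocabulary
theorem tokens_closed : ∀ kv ∈ shapeSynonyms.items, ∀ t ∈ kv.2, t ∈ allTokens := by
  simp only [mem_allTokens]; decide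

-- core: A's forward-or-reverse hit condition coincides with B's vocabulary-scan condition
theorem any_core (v db : String) (hv : PySem.Str.isIn v db = false) :
    (((shapeSynonyms.get? v).getD [v]).any (fun syn => PySem.Str.isIn syn db) ||
     shapeSynonyms.items.any (fun kv => kv.2.contains v && kv.2.any (fun syn => PySem.Str.isIn syn db)))
    = allTokens.any (fun t => PySem.Str.isIn t db && relatedLoop v t shapeSynonyms.items) := by
  rw [Bool.eq_iff_iff]
  simp only [relatedLoop_eq_any, Bool.or_eq_true, List.any_eq_true, Bool.and_eq_true,
    List.contains_iff_mem, beq_iff_eq]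
  constructor
  · rintro (⟨syn, hsyn, hdb⟩ | ⟨kv, hkv, hvmem, syn, hsyn, hdb⟩)
    · -- forward hit
      cases hg : shapeSynonyms.get? v with
      | none =>
        rw [hg] at hsyn
        simp only [Option.getD_none, List.mem_singleton] at hsyn
        subst hsyn
        rw [hv] at hdb; exact absurd hdb (by simp)
      | some s =>
        rw [hg] at hsyn
        simp only [Option.getD_some] at hsyn
        have hmem : (v, s) ∈ shapeSynonyms.items := PySem.Dict.mem_items_of_get?_eq_some _ hg
        exact ⟨syn, tokens_closed _ hmem _ hsyn, hdb, (v, s), hmem, hsyn, Or.inl rfl⟩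
    · -- reverse hit
      exact ⟨syn, tokens_closed _ hkv _ hsyn, hdb, kv, hkv, hsyn, Or.inr hvmem⟩
  · rintro ⟨t, _, hdb, kv, hkv, htmem, (hk | hvmem)⟩
    · -- kv is v's own row
      left
      have hg : shapeSynonyms.get? kv.1 = some kv.2 :=
        PySem.Dict.get?_of_mem_items _ hkv shapeSynonyms_keys_nodup
      rw [hk] at hg
      rw [hg]
      exact ⟨t, by simpa using htmem, hdb⟩
    · -- a row listing v
      exact Or.inr ⟨kv, hkv, hvmem, t, htmem, hdb⟩

theorem shapes_match_core (v db : String) (hv : PySem.Str.isIn v db = false) :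
    (match synLoop db ((shapeSynonyms.get? v).getD [v]) with
     | some r => r
     | none =>
       match revLoop v db shapeSynonyms.items with
       | some r => r
       | none => "conflict") = tokLoop v db allTokens := by
  rw [synLoop_eq_any, revLoop_eq_any, tokLoop_eq_ite, ← any_core v db hv]
  by_cases h1 : ((shapeSynonyms.get? v).getD [v]).any (fun syn => PySem.Str.isIn syn db) = true
  · simp only [h1, Bool.true_or]; rfl
  · rw [Bool.not_eq_true] at h1
    by_cases h2 : shapeSynonyms.items.any
        (fun kv => kv.2.contains v && kv.2.any (fun syn => PySem.Str.isIn syn db)) = true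
    · simp only [h1, h2, Bool.false_or]; rfl
    · rw [Bool.not_eq_true] at h2
      simp only [h1, h2, Bool.false_or]; rfl

-- ===== VERDICT (by name: the statement is the Claim_ definition above) =====
theorem shapes_match_py_spec : Claim_equal_shapes_match_py := by
  intro visible db_value _
  unfold Spec_shapes_match_py shapes_match_py shapes_match_py_alt
  dsimp only
  cases hx : (PySem.Str.isIn (PySem.Str.strip (PySem.Str.lower visible)) (PySem.Str.lower db_value) ||
      PySem.Str.isIn (PySem.Str.lower db_value) (PySem.Str.strip (PySem.Str.lower visible))) with
  | true => simp
  | false =>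
    simp only [Bool.false_eq_true, if_false]
    have h1 : PySem.Str.isIn (PySem.Str.strip (PySem.Str.lower visible)) (PySem.Str.lower db_value) = false :=
      (Bool.or_eq_false_iff.mp hx).1
    exact shapes_match_core (PySem.Str.strip (PySem.Str.lower visible)) (PySem.Str.lower db_value) h1
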